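-- pv_equiv track=rewrite | github.com/tech5addict-0/NLP_Project | utils.py | calc_depths
-- ===== SOURCE A (Python) =====
-- def calc_depths(grph, n=0, d=0, depths=None):
--     if depths is None:
--         depths = {n: d}
--     sx = grph.get(n)
--     if sx:
--         for s in sx:
--             depths[s] = d+1
--             calc_depths(grph, s, d+1, depths)
--     return depths
-- ===== SOURCE B (Python) =====
-- def calc_depths(grph, n=0, d=0, depths=None):
--     if depths is None:
--         depths = {n: d}
--     stack = [(s, d + 1) for s in reversed(grph.get(n) or [])]
--     while stack:
--         node, dd = stack.pop()
--         depths[node] = dd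
--         for c in reversed(grph.get(node) or []):
--             stack.append((c, dd + 1))
--     return depths
-- ===== Notes on version B (the rewrite author's own statement) =====
-- stated objective: alternative
-- what changed: A's recursive DFS is replaced by an iterative DFS with an explicit stack (children pushed in reverse so the write order of depths is identical); same traversal cost, no Python recursion.
import Mathlib
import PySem

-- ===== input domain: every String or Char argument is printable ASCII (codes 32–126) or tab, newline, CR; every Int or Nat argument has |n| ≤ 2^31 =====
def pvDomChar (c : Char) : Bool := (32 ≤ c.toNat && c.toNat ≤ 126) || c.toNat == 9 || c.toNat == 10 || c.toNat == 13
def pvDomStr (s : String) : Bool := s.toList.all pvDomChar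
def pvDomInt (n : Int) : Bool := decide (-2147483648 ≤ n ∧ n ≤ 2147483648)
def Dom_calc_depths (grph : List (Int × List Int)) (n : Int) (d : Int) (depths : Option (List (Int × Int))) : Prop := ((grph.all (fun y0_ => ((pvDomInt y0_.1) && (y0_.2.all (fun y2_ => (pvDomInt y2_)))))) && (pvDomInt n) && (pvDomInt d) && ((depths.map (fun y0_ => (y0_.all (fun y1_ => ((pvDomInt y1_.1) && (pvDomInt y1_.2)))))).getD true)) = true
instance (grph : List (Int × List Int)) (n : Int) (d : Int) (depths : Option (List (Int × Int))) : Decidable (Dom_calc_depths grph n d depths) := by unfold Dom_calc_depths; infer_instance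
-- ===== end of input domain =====

-- B replaces A's recursive DFS by an iterative DFS with an explicit stack (children pushed in
-- reverse) — an alternative decomposition, same cost; both versions mutate a caller-supplied
-- `depths` dict in place exactly alike, and the equivalence proved here is about the return value.

-- shared helpers (Python's `grph.get(x)` and `grph.get(x) or []`)
def pvGraphGet (grph : List (Int × List Int)) (x : Int) : Option (List Int) :=
  (PySem.Dict.mk grph).get? x

def pvChildren (grph : List (Int × List Int)) (x : Int) : List Int :=
  (pvGraphGet grph x).getD []

-- fuel bound used by the ports (totality guards only): S = total number of successor entries
def pvS (grph : List (Int × List Int)) : Nat := (grph.map (fun p => p.2.length)).sum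

-- ===== PORT A =====
-- recursive DFS, literal transliteration of Source A; fuel only makes the recursion total
-- (pvS grph + 2 is enough whenever the Python terminates, i.e. on Pre_)
def calcAGo (grph : List (Int × List Int)) : Nat → PySem.Dict Int Int → Int → Int → PySem.Dict Int Int
  | 0, dep, _, _ => dep
  | f+1, dep, n, d =>
    match pvGraphGet grph n with                -- sx = grph.get(n)
    | none => dep
    | some sx =>
      if sx.isEmpty then dep                    -- if sx:
      else sx.foldl (fun dep s => calcAGo grph f (dep.insert s (d+1)) s (d+1)) dep
                                                -- depths[s] = d+1; calc_depths(grph, s, d+1, depths)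

def calc_depths (grph : List (Int × List Int)) (n : Int) (d : Int) (depths : Option (List (Int × Int))) : List (Int × Int) :=
  let dep : PySem.Dict Int Int :=
    match depths with
    | none => PySem.Dict.mk [(n, d)]            -- depths = {n: d}
    | some l => PySem.Dict.mk l
  (calcAGo grph (pvS grph + 2) dep n d).items

-- ===== PORT B =====
-- iterative DFS with an explicit stack (Source B); stack top is the list head (Python pops from the
-- end, so pushing `reversed(children)` is the reverse-foldl below); fuel is a totality guard
def loopB (grph : List (Int × List Int)) : Nat → PySem.Dict Int Int → List (Int × Int) → PySem.Dict Int Int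
  | 0, dep, _ => dep
  | _+1, dep, [] => dep                         -- while stack:
  | f+1, dep, (node, dd) :: st =>               -- node, dd = stack.pop()
      loopB grph f (dep.insert node dd)         -- depths[node] = dd
        ((pvChildren grph node).reverse.foldl (fun acc c => (c, dd+1) :: acc) st)
                                                -- for c in reversed(...): stack.append((c, dd+1))

def calc_depths_alt (grph : List (Int × List Int)) (n : Int) (d : Int) (depths : Option (List (Int × Int))) : List (Int × Int) :=
  let dep : PySem.Dict Int Int :=
    match depths with
    | none => PySem.Dict.mk [(n, d)]
    | some l => PySem.Dict.mk l
  let stack0 := (pvChildren grph n).reverse.foldl (fun acc s => (s, d+1) :: acc) []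
                                                -- stack = [(s, d+1) for s in reversed(grph.get(n) or [])]
  (loopB grph ((pvS grph + 2) ^ (pvS grph + 2)) dep stack0).items

-- ===== PRECONDITION & SPEC =====
-- reachability closure: one step adds every present node's successors
def pvStep (grph : List (Int × List Int)) (s : Finset Int) : Finset Int :=
  s ∪ s.biUnion (fun x => (pvChildren grph x).toFinset)

def pvUniv (grph : List (Int × List Int)) : Finset Int := (grph.flatMap (fun p => p.2)).toFinset

def pvClosure (grph : List (Int × List Int)) (s : Finset Int) : Finset Int :=
  (pvStep grph)^[(s ∪ pvUniv grph).card + 1] s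

-- n together with everything reachable from n
def pvReach (grph : List (Int × List Int)) (n : Int) : Finset Int := pvClosure grph {n}
-- everything reachable from x in at least one step (x ∈ pvCyc x ↔ x lies on a cycle)
def pvCyc (grph : List (Int × List Int)) (x : Int) : Finset Int :=
  pvClosure grph (pvChildren grph x).toFinset

-- Pre_: no node reachable from n lies on a cycle — exactly the inputs on which A's recursion
-- terminates (on a reachable cycle the Python recurses forever / raises RecursionError)
def Pre_calc_depths (grph : List (Int × List Int)) (n : Int) (d : Int) (depths : Option (List (Int × Int))) : Prop :=
  ∀ x ∈ pvReach grph n, x ∉ pvCyc grph x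
instance (grph : List (Int × List Int)) (n : Int) (d : Int) (depths : Option (List (Int × Int))) : Decidable (Pre_calc_depths grph n d depths) := by unfold Pre_calc_depths; infer_instance

def pvWitness_calc_depths : (List (Int × List Int)) × Int × Int × (Option (List (Int × Int))) :=
  ([(0, [1, 2]), (1, [2]), (2, [])], 0, 0, none)

def Spec_calc_depths (grph : List (Int × List Int)) (n : Int) (d : Int) (depths : Option (List (Int × Int))) (out : List (Int × Int)) : Prop := out = calc_depths_alt grph n d depths
instance (grph : List (Int × List Int)) (n : Int) (d : Int) (depths : Option (List (Int × Int))) (out : List (Int × Int)) : Decidable (Spec_calc_depths grph n d depths out) := by unfold Spec_calc_depths; infer_instance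

-- ===== CLAIM (what is proved, stated in full; the proofs are below) =====
def Claim_equal_calc_depths : Prop := ∀ (grph : List (Int × List Int)) (n : Int) (d : Int) (depths : Option (List (Int × Int))), Dom_calc_depths grph n d depths → Pre_calc_depths grph n d depths → Spec_calc_depths grph n d depths (calc_depths grph n d depths)

-- ===== LEMMAS AND PROOFS =====

-- fuel sufficiency predicate for A's recursion
def TermA (grph : List (Int × List Int)) : Nat → Int → Prop
  | 0, _ => False
  | f+1, x => ∀ c ∈ pvChildren grph x, TermA grph f c

-- number of stack pops B performs for one entry (x, ·), fueled like A's recursion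
def pvPopc (grph : List (Int × List Int)) : Nat → Int → Nat
  | 0, _ => 1
  | f+1, x => 1 + ((pvChildren grph x).map (pvPopc grph f)).sum

theorem calcAGo_succ (grph : List (Int × List Int)) (f : Nat) (dep : PySem.Dict Int Int) (n d : Int) :
    calcAGo grph (f+1) dep n d
      = (pvChildren grph n).foldl (fun dep s => calcAGo grph f (dep.insert s (d+1)) s (d+1)) dep := by
  conv_lhs => rw [calcAGo]
  unfold pvChildren
  cases h : pvGraphGet grph n with
  | none => simp
  | some sx => cases sx with
    | nil => simp
    | cons a l => simp

theorem pushRev (l : List Int) (v : Int) (st : List (Int × Int)) :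
    l.reverse.foldl (fun acc c => (c, v) :: acc) st = l.map (fun c => (c, v)) ++ st := by
  induction l generalizing st with
  | nil => rfl
  | cons a l ih => simp [List.foldl_append, ih]

-- simulation: the stack loop processes one ready layer exactly like A's fold of recursive calls
theorem loopB_sim (grph : List (Int × List Int)) :
    ∀ (f : Nat) (cs : List Int) (dd : Int), (∀ c ∈ cs, TermA grph f c) →
    ∀ (dep : PySem.Dict Int Int) (st : List (Int × Int)) (g : Nat),
      loopB grph ((cs.map (pvPopc grph f)).sum + g) dep (cs.map (fun c => (c, dd)) ++ st)
        = loopB grph g (cs.foldl (fun dep c => calcAGo grph f (dep.insert c dd) c dd) dep) st := by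
  intro f
  induction f with
  | zero =>
    intro cs dd h
    cases cs with
    | nil => intro dep st g; simp
    | cons c cs => exact absurd (h c (by simp)) (by simp [TermA])
  | succ f ihf =>
    intro cs dd h
    induction cs generalizing dd with
    | nil => intro dep st g; simp
    | cons c cs ihc =>
      intro dep st g
      have hfuel : (((c :: cs).map (pvPopc grph (f+1))).sum + g)
          = (((pvChildren grph c).map (pvPopc grph f)).sum
              + ((cs.map (pvPopc grph (f+1))).sum + g)) + 1 := by
        simp [pvPopc]; omega
      rw [hfuel]
      simp only [List.map_cons, List.cons_append, loopB, pushRev]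
      rw [ihf (pvChildren grph c) (dd+1) (h c (by simp)) (dep.insert c dd)
            (cs.map (fun c => (c, dd)) ++ st) ((cs.map (pvPopc grph (f+1))).sum + g)]
      rw [← calcAGo_succ]
      rw [ihc dd (fun c hc => h c (by simp [hc]))]
      simp

theorem loopB_nil (grph : List (Int × List Int)) (g : Nat) (dep : PySem.Dict Int Int) :
    loopB grph g dep [] = dep := by
  cases g <;> rfl

-- closure facts
theorem children_subset_univ (grph : List (Int × List Int)) (x : Int) :
    ∀ y ∈ pvChildren grph x, y ∈ pvUniv grph := by
  unfold pvChildren pvGraphGet pvUniv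
  induction grph with
  | nil => simp [PySem.Dict.get?]
  | cons p rest ih =>
    obtain ⟨k, v⟩ := p
    intro y hy
    rw [PySem.Dict.get?_mk_cons] at hy
    by_cases hk : k == x
    · simp only [hk, if_pos] at hy
      simp only [Option.getD_some] at hy
      simp [List.flatMap_cons]
      exact Or.inl hy
    · simp only [hk, if_neg, Bool.false_eq_true, not_false_iff] at hy
      have := ih y hy
      simp [List.flatMap_cons]
      right
      simpa using this

theorem children_length_le (grph : List (Int × List Int)) (x : Int) :
    (pvChildren grph x).length ≤ pvS grph := by
  unfold pvChildren pvGraphGet pvS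
  induction grph with
  | nil => simp [PySem.Dict.get?]
  | cons p rest ih =>
    obtain ⟨k, v⟩ := p
    rw [PySem.Dict.get?_mk_cons]
    by_cases hk : k == x
    · simp only [hk, if_pos, Option.getD_some, List.map_cons, List.sum_cons]
      omega
    · simp only [hk, if_neg, Bool.false_eq_true, not_false_iff, List.map_cons, List.sum_cons]
      omega

-- basic facts about the one-step operator and its iterates
theorem pvStep_sub (grph : List (Int × List Int)) (s : Finset Int) : s ⊆ pvStep grph s :=
  Finset.subset_union_left

theorem iterate_sub (grph : List (Int × List Int)) (s : Finset Int) (k : Nat) :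
    s ⊆ (pvStep grph)^[k] s := by
  induction k with
  | zero => simp
  | succ k ih =>
    rw [Function.iterate_succ_apply']
    exact ih.trans (pvStep_sub grph _)

theorem pvStep_preserve (grph : List (Int × List Int)) (T : Finset Int)
    (hT : ∀ x ∈ T, ∀ c ∈ pvChildren grph x, c ∈ T) (s : Finset Int) (hs : s ⊆ T) :
    pvStep grph s ⊆ T := by
  unfold pvStep
  intro y hy
  rcases Finset.mem_union.1 hy with hy | hy
  · exact hs hy
  · rcases Finset.mem_biUnion.1 hy with ⟨x, hx, hyx⟩
    exact hT x (hs hx) y (List.mem_toFinset.1 hyx)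

theorem iterate_sub_of_closed (grph : List (Int × List Int)) (T : Finset Int)
    (hT : ∀ x ∈ T, ∀ c ∈ pvChildren grph x, c ∈ T) (s : Finset Int) (hs : s ⊆ T) (k : Nat) :
    (pvStep grph)^[k] s ⊆ T := by
  induction k with
  | zero => simpa
  | succ k ih =>
    rw [Function.iterate_succ_apply']
    exact pvStep_preserve grph T hT _ ih

theorem iterate_sub_univ (grph : List (Int × List Int)) (s : Finset Int) (k : Nat) :
    (pvStep grph)^[k] s ⊆ s ∪ pvUniv grph := by
  apply iterate_sub_of_closed grph _ _ s Finset.subset_union_left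
  intro x _ c hc
  exact Finset.mem_union_right _ (children_subset_univ grph x c hc)

-- pigeonhole: within (s ∪ univ).card + 1 steps the iteration reaches a fixed point
theorem exists_fix (grph : List (Int × List Int)) (s : Finset Int) :
    ∃ t ≤ (s ∪ pvUniv grph).card, pvStep grph ((pvStep grph)^[t] s) = (pvStep grph)^[t] s := by
  by_contra hno
  push Not at hno
  have grow : ∀ k, k ≤ (s ∪ pvUniv grph).card + 1 → s.card + k ≤ ((pvStep grph)^[k] s).card := by
    intro k
    induction k with
    | zero => simp
    | succ k ih =>
      intro hk
      have hne : pvStep grph ((pvStep grph)^[k] s) ≠ (pvStep grph)^[k] s :=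
        hno k (by omega)
      have hss : (pvStep grph)^[k] s ⊂ (pvStep grph)^[k+1] s := by
        rw [Function.iterate_succ_apply']
        exact Finset.ssubset_iff_subset_ne.2 ⟨pvStep_sub grph _, fun h => hne h.symm⟩
      have := Finset.card_lt_card hss
      have := ih (by omega)
      omega
  have h1 := grow ((s ∪ pvUniv grph).card + 1) le_rfl
  have h2 : ((pvStep grph)^[(s ∪ pvUniv grph).card + 1] s).card ≤ (s ∪ pvUniv grph).card :=
    Finset.card_le_card (iterate_sub_univ grph s _)
  omega

theorem pvClosure_fix (grph : List (Int × List Int)) (s : Finset Int) :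
    pvStep grph (pvClosure grph s) = pvClosure grph s := by
  obtain ⟨t, ht, hfix⟩ := exists_fix grph s
  have stays : ∀ j, (pvStep grph)^[t + j] s = (pvStep grph)^[t] s := by
    intro j
    induction j with
    | zero => rfl
    | succ j ih =>
      have : t + (j + 1) = (t + j) + 1 := by omega
      rw [this, Function.iterate_succ_apply', ih, hfix]
  have : (s ∪ pvUniv grph).card + 1 = t + ((s ∪ pvUniv grph).card + 1 - t) := by omega
  unfold pvClosure
  rw [this, stays, hfix]

theorem subset_pvClosure (grph : List (Int × List Int)) (s : Finset Int) : s ⊆ pvClosure grph s := by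
  exact iterate_sub grph s _

theorem pvClosure_closed (grph : List (Int × List Int)) (s : Finset Int) :
    ∀ x ∈ pvClosure grph s, ∀ c ∈ pvChildren grph x, c ∈ pvClosure grph s := by
  intro x hx c hc
  have := pvClosure_fix grph s
  rw [← this]
  unfold pvStep
  exact Finset.mem_union_right _ (Finset.mem_biUnion.2 ⟨x, hx, List.mem_toFinset.2 hc⟩)

theorem pvClosure_min (grph : List (Int × List Int)) (s : Finset Int) (T : Finset Int)
    (hsT : s ⊆ T) (hT : ∀ x ∈ T, ∀ c ∈ pvChildren grph x, c ∈ T) : pvClosure grph s ⊆ T := by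
  exact iterate_sub_of_closed grph T hT s hsT _

theorem pvCyc_subset_univ (grph : List (Int × List Int)) (x : Int) : pvCyc grph x ⊆ pvUniv grph := by
  unfold pvCyc
  apply pvClosure_min
  · intro y hy
    exact children_subset_univ grph x y (List.mem_toFinset.1 hy)
  · intro y _ c hc
    exact children_subset_univ grph y c hc

theorem univ_card_le (grph : List (Int × List Int)) : (pvUniv grph).card ≤ pvS grph := by
  unfold pvUniv pvS
  calc (grph.flatMap (fun p => p.2)).toFinset.card
      ≤ (grph.flatMap (fun p => p.2)).length := (grph.flatMap (fun p => p.2)).toFinset_card_le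
    _ = (grph.map (fun p => p.2.length)).sum := by
        rw [List.length_flatMap]

-- under Pre_, every node reachable from n admits fuel pvS+1
theorem reach_TermA (grph : List (Int × List Int)) (n : Int)
    (hpre : ∀ x ∈ pvReach grph n, x ∉ pvCyc grph x) :
    ∀ x ∈ pvReach grph n, TermA grph (pvS grph + 1) x := by
  have key : ∀ m x, x ∈ pvReach grph n → (pvCyc grph x).card ≤ m → TermA grph (m+1) x := by
    intro m
    induction m with
    | zero =>
      intro x hx hcard
      intro c hc
      exfalso
      have hc' : c ∈ pvCyc grph x :=
        subset_pvClosure grph _ (List.mem_toFinset.2 hc)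
      have : (pvCyc grph x) = ∅ := Finset.card_eq_zero.1 (by omega)
      rw [this] at hc'
      exact absurd hc' (Finset.notMem_empty c)
    | succ m ih =>
      intro x hx hcard
      intro c hc
      have hcR : c ∈ pvReach grph n := pvClosure_closed grph _ x hx c hc
      have hcCx : c ∈ pvCyc grph x :=
        subset_pvClosure grph _ (List.mem_toFinset.2 hc)
      have hsub : pvCyc grph c ⊆ pvCyc grph x := by
        apply pvClosure_min
        · intro y hy
          exact pvClosure_closed grph _ c hcCx y (List.mem_toFinset.1 hy)
        · exact pvClosure_closed grph _
      have hss : pvCyc grph c ⊂ pvCyc grph x :=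
        Finset.ssubset_iff_subset_ne.2 ⟨hsub, fun h => (hpre c hcR) (h ▸ hcCx)⟩
      have := Finset.card_lt_card hss
      exact ih c hcR (by omega)
  intro x hx
  have h1 : (pvCyc grph x).card ≤ pvS grph :=
    le_trans (Finset.card_le_card (pvCyc_subset_univ grph x)) (univ_card_le grph)
  exact key (pvS grph) x hx h1

theorem pvPopc_le (grph : List (Int × List Int)) (f : Nat) (x : Int) :
    pvPopc grph f x ≤ (pvS grph + 1) ^ f := by
  induction f generalizing x with
  | zero => simp [pvPopc]
  | succ f ih =>
    have hlen := children_length_le grph x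
    have hsum : ((pvChildren grph x).map (pvPopc grph f)).sum
        ≤ (pvChildren grph x).length * (pvS grph + 1) ^ f := by
      calc ((pvChildren grph x).map (pvPopc grph f)).sum
          ≤ ((pvChildren grph x).map (pvPopc grph f)).length * ((pvS grph + 1) ^ f) := by
            apply List.sum_le_card_nsmul
            intro y hy
            obtain ⟨c, _, rfl⟩ := List.mem_map.1 hy
            exact ih c
        _ = (pvChildren grph x).length * (pvS grph + 1) ^ f := by rw [List.length_map]
    have hpow : 1 ≤ (pvS grph + 1) ^ f := Nat.one_le_pow _ _ (by omega)
    calc pvPopc grph (f+1) x = 1 + ((pvChildren grph x).map (pvPopc grph f)).sum := rfl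
      _ ≤ 1 + pvS grph * (pvS grph + 1) ^ f := by
          have : (pvChildren grph x).length * (pvS grph + 1) ^ f ≤ pvS grph * (pvS grph + 1) ^ f :=
            Nat.mul_le_mul_right _ hlen
          omega
      _ ≤ (pvS grph + 1) ^ (f + 1) := by
          rw [pow_succ]
          nlinarith

theorem ports_agree (grph : List (Int × List Int)) (n d : Int)
    (hpre : ∀ x ∈ pvReach grph n, x ∉ pvCyc grph x) (dep0 : PySem.Dict Int Int) :
    calcAGo grph (pvS grph + 2) dep0 n d
      = loopB grph ((pvS grph + 2) ^ (pvS grph + 2)) dep0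
          ((pvChildren grph n).reverse.foldl (fun acc s => (s, d+1) :: acc) []) := by
  set S := pvS grph with hS
  rw [pushRev]
  simp only [List.append_nil]
  have hnR : n ∈ pvReach grph n :=
    subset_pvClosure grph {n} (Finset.mem_singleton_self n)
  have hterm : ∀ c ∈ pvChildren grph n, TermA grph (S + 1) c := by
    intro c hc
    exact reach_TermA grph n hpre c (pvClosure_closed grph {n} n hnR c hc)
  have hsumB : ((pvChildren grph n).map (pvPopc grph (S + 1))).sum ≤ (S + 2) ^ (S + 2) := by
    have h1 : ((pvChildren grph n).map (pvPopc grph (S + 1))).sum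
        ≤ ((pvChildren grph n).map (pvPopc grph (S + 1))).length * ((S + 1) ^ (S + 1)) := by
      apply List.sum_le_card_nsmul
      intro y hy
      obtain ⟨c, _, rfl⟩ := List.mem_map.1 hy
      exact pvPopc_le grph (S + 1) c
    rw [List.length_map] at h1
    have h2 : (pvChildren grph n).length * (S + 1) ^ (S + 1) ≤ S * (S + 1) ^ (S + 1) :=
      Nat.mul_le_mul_right _ (children_length_le grph n)
    have h3 : S * (S + 1) ^ (S + 1) ≤ (S + 1) ^ (S + 2) := by
      rw [pow_succ ((S : Nat) + 1) (S + 1)]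
      rw [mul_comm ((S + 1 : Nat) ^ (S + 1)) (S + 1)]
      exact Nat.mul_le_mul_right _ (by omega)
    have h4 : (S + 1) ^ (S + 2) ≤ (S + 2) ^ (S + 2) :=
      Nat.pow_le_pow_left (by omega) _
    omega
  obtain ⟨g, hg⟩ : ∃ g, (S + 2) ^ (S + 2)
      = ((pvChildren grph n).map (pvPopc grph (S + 1))).sum + g :=
    ⟨(S + 2) ^ (S + 2) - ((pvChildren grph n).map (pvPopc grph (S + 1))).sum, by omega⟩
  rw [hg]
  have hsim := loopB_sim grph (S + 1) (pvChildren grph n) (d + 1) hterm dep0 [] g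
  rw [← List.append_nil ((pvChildren grph n).map (fun c => (c, d + 1)))]
  rw [hsim, loopB_nil]
  have hs2 : S + 2 = (S + 1) + 1 := rfl
  rw [hs2, calcAGo_succ]

-- ===== VERDICT (by name: the statement is the Claim_ definition above) =====
theorem calc_depths_spec : Claim_equal_calc_depths := by
  intro grph n d depths _ hpre
  unfold Spec_calc_depths calc_depths calc_depths_alt
  cases depths with
  | none => exact congrArg PySem.Dict.items (ports_agree grph n d hpre (PySem.Dict.mk [(n, d)]))
  | some l => exact congrArg PySem.Dict.items (ports_agree grph n d hpre (PySem.Dict.mk l))
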